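-- pv_equiv track=rewrite | github.com/sayakokodera/past_work | 1_bachelor_thesis/code/ese_datagenerator_pos_scan_run_script.py | find_repeated_entries
-- ===== SOURCE A (Python) =====
-- def find_repeated_entries(input_arr):
--     seen =  []
--     idx_list = []
--     repeated_entries = {}
--     for idx in range(len(input_arr)):
--         entry = list(input_arr[idx])
--         if entry in seen:
--             idx_list.append(idx)
--             repeated_entries[str(entry)].append(idx)
--         else:
--             seen.append(entry)
--             entry_list = [idx]
--             repeated_entries.update({
--                 str(entry) : entry_list
--                 })
--     return seen, repeated_entries, idx_list
-- ===== SOURCE B (Python) =====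
-- def find_repeated_entries(input_arr):
--     # One unconditional grouping pass keyed by str(row); outputs derived from the groups.
--     groups = {}
--     for idx, row in enumerate(input_arr):
--         groups.setdefault(str(list(row)), []).append(idx)
--     seen = [list(input_arr[grp[0]]) for grp in groups.values()]
--     idx_list = sorted(i for grp in groups.values() for i in grp[1:])
--     return seen, groups, idx_list
-- ===== Notes on version B (the rewrite author's own statement) =====
-- stated objective: alternative
-- what changed: A's single loop with an 'entry in seen' linear scan and three interleaved accumulators is replaced by one unconditional grouping pass (dict of str(row) -> index list via setdefault) from which seen, the repeated-entries dict and the globally sorted repeat-index list are derived afterwards.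
import Mathlib
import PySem

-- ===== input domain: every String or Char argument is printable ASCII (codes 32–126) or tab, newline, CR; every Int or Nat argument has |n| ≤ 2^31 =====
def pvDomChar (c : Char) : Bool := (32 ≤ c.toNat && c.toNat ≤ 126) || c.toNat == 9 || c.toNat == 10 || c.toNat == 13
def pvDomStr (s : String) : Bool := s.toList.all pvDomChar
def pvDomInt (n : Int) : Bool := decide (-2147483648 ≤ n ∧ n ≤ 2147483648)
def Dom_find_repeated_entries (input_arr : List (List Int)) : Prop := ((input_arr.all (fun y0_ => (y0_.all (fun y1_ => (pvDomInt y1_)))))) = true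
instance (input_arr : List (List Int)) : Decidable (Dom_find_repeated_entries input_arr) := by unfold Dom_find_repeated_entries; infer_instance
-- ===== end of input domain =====

-- B replaces A's 'entry in seen' scan-and-branch loop by one unconditional grouping pass
-- keyed by str(row), deriving seen, the dict and the sorted repeat-index list afterwards.

-- str(entry) for a Python list of ints: '[' + ', '.join(str(x)) + ']'  (exact for int lists)
def pyStrRow (r : List Int) : String :=
  "[" ++ PySem.Str.join ", " (r.map PySem.Int.toStr) ++ "]"

-- ===== PORT A =====
-- loop body of A: entry = list(input_arr[idx]); if entry in seen: … else: …
-- (rep[str(entry)].append(idx) is Dict.modify with default []: the key is always present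
--  in that branch, so the default is never used and the port is exact)
def feStep (input_arr : List (List Int))
    (st : List (List Int) × PySem.Dict String (List Int) × List Int) (idx : Int) :
    List (List Int) × PySem.Dict String (List Int) × List Int :=
  let entry := PySem.List.pyGetD input_arr idx []  -- idx ∈ range(len), always in range: exact
  if entry ∈ st.1 then
    (st.1, st.2.1.modify (pyStrRow entry) [] (fun l => l ++ [idx]), st.2.2 ++ [idx])
  else
    (st.1 ++ [entry], st.2.1.insert (pyStrRow entry) [idx], st.2.2)

def find_repeated_entries (input_arr : List (List Int)) :
    List (List Int) × (List (String × List Int)) × List Int :=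
  let st := (PySem.List.pyRange 0 (PySem.List.len input_arr)).foldl (feStep input_arr)
    ([], PySem.Dict.empty, [])
  (st.1, st.2.1.items, st.2.2)

-- ===== PORT B =====
-- groups.setdefault(str(list(row)), []).append(idx)  =  d[k] = d.get(k, []) + [idx]  =  Dict.modify
def feGroup (g : PySem.Dict String (List Int)) (p : Int × List Int) :
    PySem.Dict String (List Int) :=
  g.modify (pyStrRow p.2) [] (fun l => l ++ [p.1])

def find_repeated_entries_alt (input_arr : List (List Int)) :
    List (List Int) × (List (String × List Int)) × List Int :=
  let groups := (PySem.List.enumerate input_arr).foldl feGroup PySem.Dict.empty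
  -- list(input_arr[grp[0]]): groups are nonempty and hold in-range indices, defaults unused: exact
  let seen := groups.values.map (fun grp =>
    PySem.List.pyGetD input_arr (PySem.List.pyGetD grp 0 0) [])
  -- sorted(i for grp in groups.values() for i in grp[1:])  (grp[1:] = drop 1: exact)
  let idx_list := PySem.List.sorted (groups.values.flatMap (fun grp => grp.drop 1)) (fun i => i)
  (seen, groups.items, idx_list)

-- ===== PRECONDITION & SPEC =====
def Spec_find_repeated_entries (input_arr : List (List Int)) (out : List (List Int) × (List (String × List Int)) × List Int) : Prop := out = find_repeated_entries_alt input_arr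
instance (input_arr : List (List Int)) (out : List (List Int) × (List (String × List Int)) × List Int) : Decidable (Spec_find_repeated_entries input_arr out) := by unfold Spec_find_repeated_entries; infer_instance

-- ===== CLAIM (what is proved, stated in full; the proofs are below) =====
def Claim_equal_find_repeated_entries : Prop := ∀ (input_arr : List (List Int)), Dom_find_repeated_entries input_arr → Spec_find_repeated_entries input_arr (find_repeated_entries input_arr)

-- ===== LEMMAS AND PROOFS =====

-- ---------- str(list of ints) is injective ----------

theorem pv_dec_digit (d : Nat) (hd : d < 10) : (Nat.digitChar d).toNat - 48 = d := by
  interval_cases d <;> rfl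

theorem pv_dec_toDigits (n : Nat) :
    (Nat.toDigits 10 n).foldl (fun a c => 10 * a + (c.toNat - 48)) 0 = n := by
  induction n using Nat.strong_induction_on with
  | _ n ih =>
    rw [Nat.toDigits_eq_if (by norm_num)]
    split_ifs with h
    · simp [List.foldl, pv_dec_digit n h]
    · rw [List.foldl_append, ih (n / 10) (by omega)]
      simp only [List.foldl]
      have := pv_dec_digit (n % 10) (by omega)
      omega

theorem pv_toDigits10_inj {a b : Nat} (h : Nat.toDigits 10 a = Nat.toDigits 10 b) : a = b := by
  have := congrArg (fun l => l.foldl (fun a c => 10 * a + (c.toNat - 48)) 0) h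
  simpa [pv_dec_toDigits] using this

theorem pv_toChars_ne_nil (n : Int) : PySem.Int.toChars n ≠ [] := by
  unfold PySem.Int.toChars
  split_ifs
  · simp
  · intro h
    have := @Nat.length_toDigits_pos 10 n.toNat
    simp [h] at this

theorem pv_mem_toChars {c : Char} {n : Int} (h : c ∈ PySem.Int.toChars n) :
    c = '-' ∨ c.isDigit = true := by
  unfold PySem.Int.toChars at h
  split_ifs at h
  · rcases List.mem_cons.mp h with h' | h'
    · exact Or.inl h'
    · exact Or.inr (Nat.isDigit_of_mem_toDigits (by norm_num) (by norm_num) h')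
  · exact Or.inr (Nat.isDigit_of_mem_toDigits (by norm_num) (by norm_num) h)

theorem pv_toChars_no_comma {c : Char} {n : Int} (h : c ∈ PySem.Int.toChars n) : c ≠ ',' := by
  rcases pv_mem_toChars h with h' | h' <;> intro hc
  · rw [hc] at h'; exact absurd h' (by decide)
  · rw [hc] at h'; exact absurd h' (by decide)

theorem pv_toChars_inj {m n : Int} (h : PySem.Int.toChars m = PySem.Int.toChars n) : m = n := by
  unfold PySem.Int.toChars at h
  split_ifs at h with h1 h2 h2
  · simp only [List.cons.injEq] at h
    have := pv_toDigits10_inj h.2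
    omega
  · exfalso
    have hm : '-' ∈ Nat.toDigits 10 n.toNat := h ▸ List.mem_cons_self
    have := Nat.isDigit_of_mem_toDigits (b := 10) (by norm_num) (by norm_num) hm
    exact absurd this (by decide)
  · exfalso
    have hm : '-' ∈ Nat.toDigits 10 m.toNat := h ▸ List.mem_cons_self
    have := Nat.isDigit_of_mem_toDigits (b := 10) (by norm_num) (by norm_num) hm
    exact absurd this (by decide)
  · have := pv_toDigits10_inj h
    omega

-- comma-free tokens followed by []-or-comma tails split uniquely
theorem pv_prefix_unique : ∀ (u v s t : List Char),
    (∀ c ∈ u, c ≠ ',') → (∀ c ∈ v, c ≠ ',') →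
    (s = [] ∨ ∃ s', s = ',' :: s') → (t = [] ∨ ∃ t', t = ',' :: t') →
    u ++ s = v ++ t → u = v ∧ s = t := by
  intro u
  induction u with
  | nil =>
    intro v s t _ hv hs ht h
    cases v with
    | nil => exact ⟨rfl, h⟩
    | cons d v' =>
      exfalso
      rcases hs with rfl | ⟨s', rfl⟩
      · rcases ht with rfl | ⟨t', rfl⟩ <;> simp_all
      · simp at h
        exact hv d (by simp) h.1.symm
  | cons c u' ih =>
    intro v s t hu hv hs ht h
    cases v with
    | nil =>
      exfalso
      rcases ht with rfl | ⟨t', rfl⟩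
      · rcases hs with rfl | ⟨s', rfl⟩ <;> simp_all
      · simp at h
        exact hu c (by simp) h.1
    | cons d v' =>
      simp only [List.cons_append, List.cons.injEq] at h
      obtain ⟨rfl, h2⟩ := h
      obtain ⟨h3, h4⟩ := ih v' s t (fun x hx => hu x (by simp [hx])) (fun x hx => hv x (by simp [hx])) hs ht h2
      exact ⟨by rw [h3], h4⟩

theorem pv_intercalate_cons (x : Int) (xs : List Int) :
    List.intercalate [',', ' '] ((x :: xs).map PySem.Int.toChars) =
      PySem.Int.toChars x ++
        (match xs with
          | [] => []
          | _ :: _ => ',' :: ' ' :: List.intercalate [',', ' '] (xs.map PySem.Int.toChars)) := by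
  cases xs with
  | nil => simp [List.intercalate]
  | cons z zs => simp [List.intercalate]

theorem pv_chain_inj : ∀ (a b : List Int),
    List.intercalate [',', ' '] (a.map PySem.Int.toChars) =
      List.intercalate [',', ' '] (b.map PySem.Int.toChars) → a = b := by
  intro a
  induction a with
  | nil =>
    intro b h
    cases b with
    | nil => rfl
    | cons y bs =>
      exfalso
      rw [pv_intercalate_cons] at h
      simp [List.intercalate] at h
      exact pv_toChars_ne_nil y h.1
  | cons x as ih =>
    intro b h
    cases b with
    | nil =>
      exfalso
      rw [pv_intercalate_cons] at h
      simp [List.intercalate] at h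
      exact pv_toChars_ne_nil x h.1
    | cons y bs =>
      rw [pv_intercalate_cons, pv_intercalate_cons] at h
      have hsplit := pv_prefix_unique (PySem.Int.toChars x) (PySem.Int.toChars y) _ _
        (fun c hc => pv_toChars_no_comma hc) (fun c hc => pv_toChars_no_comma hc)
        (by cases as <;> simp) (by cases bs <;> simp) h
      obtain ⟨h1, h2⟩ := hsplit
      have hxy : x = y := pv_toChars_inj h1
      cases as with
      | nil =>
        cases bs with
        | nil => rw [hxy]
        | cons b2 bs' => simp at h2
      | cons a2 as' =>
        cases bs with
        | nil => simp at h2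
        | cons b2 bs' =>
          simp only [List.cons.injEq] at h2
          rw [hxy, ih (b2 :: bs') h2.2.2]

theorem pv_pyStrRow_inj {a b : List Int} (h : pyStrRow a = pyStrRow b) : a = b := by
  have h' := congrArg String.toList h
  simp only [pyStrRow, PySem.Str.join, PySem.Chars.join,
    String.toList_append, String.toList_ofList, List.map_map] at h'
  have hm : ∀ (l : List Int),
      l.map (String.toList ∘ PySem.Int.toStr) = l.map PySem.Int.toChars := by
    intro l
    apply List.map_congr_left
    intro x _
    simp [Function.comp, PySem.Int.toList_toStr]
  rw [hm a, hm b] at h'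
  have hsep : (", ".toList) = [',', ' '] := by decide
  rw [hsep] at h'
  have h2 : List.intercalate [',', ' '] (a.map PySem.Int.toChars) ++ "]".toList =
      List.intercalate [',', ' '] (b.map PySem.Int.toChars) ++ "]".toList := by
    have := h'
    simp only [show "[".toList = ['['] from by decide, List.cons_append,
      List.cons.injEq, List.append_assoc] at this ⊢
    exact this.2
  exact pv_chain_inj a b (List.append_cancel_right h2)

-- ---------- the fold equivalence ----------

-- A's loop body with the looked-up row made explicit (feStep eats the (idx, row) pair)
def feStepE (st : List (List Int) × PySem.Dict String (List Int) × List Int)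
    (p : Int × List Int) :
    List (List Int) × PySem.Dict String (List Int) × List Int :=
  if p.2 ∈ st.1 then
    (st.1, st.2.1.modify (pyStrRow p.2) [] (fun l => l ++ [p.1]), st.2.2 ++ [p.1])
  else
    (st.1 ++ [p.2], st.2.1.insert (pyStrRow p.2) [p.1], st.2.2)

def pvRecon (arr : List (List Int)) (q : String × List Int) : List Int :=
  PySem.List.pyGetD arr (PySem.List.pyGetD q.2 0 0) []

def pvInv (arr : List (List Int))
    (st : List (List Int) × PySem.Dict String (List Int) × List Int) : Prop :=
  st.1 = st.2.1.items.map (pvRecon arr)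
  ∧ (∀ q ∈ st.2.1.items, q.2 ≠ [] ∧ q.1 = pyStrRow (pvRecon arr q))
  ∧ st.2.1.keys.Nodup
  ∧ st.2.2.Pairwise (· < ·)
  ∧ st.2.2.Perm (st.2.1.items.flatMap (fun q => q.2.drop 1))

theorem pv_map_eq_self {α : Type} {f : α → α} {l : List α} (h : ∀ a ∈ l, f a = a) :
    l.map f = l := by
  induction l with
  | nil => rfl
  | cons a t ih => simp [h a (by simp), ih (fun b hb => h b (by simp [hb]))]

theorem pv_head0 {v : List Int} (hv : v ≠ []) (x : Int) :
    PySem.List.pyGetD (v ++ [x]) 0 0 = PySem.List.pyGetD v 0 0 := by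
  cases v with
  | nil => exact absurd rfl hv
  | cons a t =>
    simp [PySem.List.pyGetD, PySem.List.pyGet?, PySem.List.pyIdx?,
      show (0:Int) ≤ (t.length:Int) + 1 from by positivity]

theorem pv_contains_iff (arr : List (List Int)) (seen : List (List Int))
    (rep : PySem.Dict String (List Int)) (entry : List Int)
    (h1 : seen = rep.items.map (pvRecon arr))
    (h2 : ∀ q ∈ rep.items, q.2 ≠ [] ∧ q.1 = pyStrRow (pvRecon arr q)) :
    rep.contains (pyStrRow entry) = true ↔ entry ∈ seen := by
  constructor
  · intro h
    simp only [PySem.Dict.contains, List.any_eq_true] at h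
    obtain ⟨q, hq, hqk⟩ := h
    have hk : q.1 = pyStrRow entry := by simpa using hqk
    have := (h2 q hq).2
    have : pvRecon arr q = entry := pv_pyStrRow_inj (by rw [← this, hk])
    rw [h1]
    exact this ▸ List.mem_map_of_mem hq
  · intro h
    rw [h1] at h
    obtain ⟨q, hq, hqe⟩ := List.mem_map.mp h
    simp only [PySem.Dict.contains, List.any_eq_true]
    exact ⟨q, hq, by simp [(h2 q hq).2, hqe]⟩

theorem pv_main (arr : List (List Int)) :
    ∀ (l : List (Int × List Int)) st,
      pvInv arr st →
      (∀ p ∈ l, PySem.List.pyGetD arr p.1 [] = p.2) →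
      l.Pairwise (fun p q => p.1 < q.1) →
      (∀ p ∈ l, ∀ x ∈ st.2.2, x < p.1) →
      (l.foldl feStepE st).2.1 = l.foldl feGroup st.2.1
        ∧ pvInv arr (l.foldl feStepE st) := by
  intro l
  induction l with
  | nil => intro st hInv _ _ _; exact ⟨rfl, hInv⟩
  | cons p l' ih =>
    intro st hInv hf hp hb
    obtain ⟨hSeen, hKey, hNodup, hPw, hPerm⟩ := hInv
    obtain ⟨seen, rep, idxs⟩ := st
    obtain ⟨idx, entry⟩ := p
    simp only at hSeen hKey hNodup hPw hPerm
    have hfe : PySem.List.pyGetD arr idx [] = entry := hf (idx, entry) (by simp)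
    have hcontains := pv_contains_iff arr seen rep entry hSeen hKey
    simp only [List.foldl_cons]
    by_cases hmem : entry ∈ seen
    · -- repeat branch
      have hct : rep.contains (pyStrRow entry) = true := hcontains.mpr hmem
      -- decompose the dict at the matched key
      have : ∃ q ∈ rep.items, (q.1 == pyStrRow entry) = true := by
        simpa [PySem.Dict.contains, List.any_eq_true] using hct
      obtain ⟨q, hq, hqk⟩ := this
      have hqk' : q.1 = pyStrRow entry := by simpa using hqk
      obtain ⟨l1, l2, hdec⟩ := List.append_of_mem hq
      obtain ⟨k, v⟩ := q
      simp only at hqk' hdec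
      subst hqk'
      have hknotl1 : ∀ r ∈ l1, r.1 ≠ pyStrRow entry := by
        intro r hr hrk
        have := hNodup
        simp only [PySem.Dict.keys, hdec, List.map_append, List.map_cons,
          List.nodup_append] at this
        exact this.2.2 r.1 (List.mem_map_of_mem hr) (pyStrRow entry) (by simp) hrk
      have hknotl2 : ∀ r ∈ l2, r.1 ≠ pyStrRow entry := by
        intro r hr hrk
        have := hNodup
        simp only [PySem.Dict.keys, hdec, List.map_append, List.map_cons, List.nodup_append,
          List.nodup_cons] at this
        exact this.2.1.1 (by rw [← hrk]; exact List.mem_map_of_mem hr)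
      have hgetD : rep.getD (pyStrRow entry) [] = v :=
        PySem.Dict.getD_of_mem_items _ hq hNodup []
      have hvne : v ≠ [] := (hKey _ hq).1
      -- the modified dict, at items level
      have hitems : (rep.modify (pyStrRow entry) [] (fun l => l ++ [idx])).items =
          l1 ++ (pyStrRow entry, v ++ [idx]) :: l2 := by
        simp only [PySem.Dict.modify, hgetD, PySem.Dict.insert, hct, if_pos]
        rw [hdec]
        simp only [List.map_append, List.map_cons, beq_self_eq_true, if_pos]
        congr 1
        · exact pv_map_eq_self (fun r hr => by
            simp [show (r.1 == pyStrRow entry) = false from beq_eq_false_iff_ne.mpr (hknotl1 r hr)])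
        · congr 1
          exact pv_map_eq_self (fun r hr => by
            simp [show (r.1 == pyStrRow entry) = false from beq_eq_false_iff_ne.mpr (hknotl2 r hr)])
      have hrecon : pvRecon arr (pyStrRow entry, v ++ [idx]) = pvRecon arr (pyStrRow entry, v) := by
        simp [pvRecon, pv_head0 hvne]
      have hstep : feStepE (seen, rep, idxs) (idx, entry) =
          (seen, rep.modify (pyStrRow entry) [] (fun l => l ++ [idx]), idxs ++ [idx]) := by
        simp [feStepE, hmem]
      rw [hstep]
      have hInv' : pvInv arr (seen, rep.modify (pyStrRow entry) [] (fun l => l ++ [idx]),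
          idxs ++ [idx]) := by
        refine ⟨?_, ?_, ?_, ?_, ?_⟩
        · simp only [hitems]
          rw [hSeen, hdec]
          simp only [List.map_append, List.map_cons, hrecon]
        · intro r hr
          rw [hitems] at hr
          rcases List.mem_append.mp hr with hr' | hr'
          · exact hKey r (by rw [hdec]; exact List.mem_append.mpr (Or.inl hr'))
          · rcases List.mem_cons.mp hr' with rfl | hr''
            · refine ⟨by simp, ?_⟩
              rw [hrecon]
              exact (hKey _ hq).2
            · exact hKey r (by rw [hdec]; simp [hr''])
        · simp only [PySem.Dict.keys, hitems]
          have : (l1 ++ (pyStrRow entry, v ++ [idx]) :: l2).map (·.1) =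
              (l1 ++ (pyStrRow entry, v) :: l2).map (·.1) := by simp
          rw [this, ← hdec]
          exact hNodup
        · refine List.pairwise_append.mpr ⟨hPw, by simp, ?_⟩
          intro a ha b hb2
          simp only [List.mem_singleton] at hb2
          rw [hb2]
          exact hb (idx, entry) (by simp) a ha
        · simp only [hitems, List.flatMap_append, List.flatMap_cons]
          have hdrop : (v ++ [idx]).drop 1 = v.drop 1 ++ [idx] := by
            cases v with
            | nil => exact absurd rfl hvne
            | cons a t => simp
          rw [hdrop]
          have hPerm' : idxs.Perm (l1.flatMap (fun q => q.2.drop 1) ++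
              (v.drop 1 ++ l2.flatMap (fun q => q.2.drop 1))) := by
            have := hPerm
            rw [hdec] at this
            simpa [List.flatMap_append] using this
          refine (hPerm'.append_right [idx]).trans ?_
          simp only [List.append_assoc]
          exact List.Perm.append_left _ (List.Perm.append_left _ List.perm_append_comm)
      obtain ⟨hA, hB⟩ := ih _ hInv' (fun r hr => hf r (by simp [hr]))
        (List.Pairwise.of_cons hp)
        (by
          intro r hr x hx
          simp only [List.mem_append, List.mem_singleton] at hx
          rcases hx with hx | rfl
          · exact hb r (by simp [hr]) x hx
          · exact (List.pairwise_cons.mp hp).1 r hr)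
      refine ⟨?_, hB⟩
      rw [hA]
      rfl
    · -- first-occurrence branch
      have hcf : rep.contains (pyStrRow entry) = false := by
        rcases h : rep.contains (pyStrRow entry) with _ | _
        · rfl
        · exact absurd (hcontains.mp h) hmem
      have hgroup : feGroup rep (idx, entry) = rep.insert (pyStrRow entry) [idx] := by
        have hget : rep.getD (pyStrRow entry) [] = [] := by
          simp only [PySem.Dict.getD, PySem.Dict.get?]
          have : rep.items.find? (fun r => r.1 == pyStrRow entry) = none := by
            rw [List.find?_eq_none]
            intro r hr hrk
            simp only [PySem.Dict.contains] at hcf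
            rw [List.any_eq_false] at hcf
            exact absurd hrk (by simpa using hcf r hr)
          simp [this]
        simp [feGroup, PySem.Dict.modify, hget]
      have hitems : (rep.insert (pyStrRow entry) [idx]).items =
          rep.items ++ [(pyStrRow entry, [idx])] :=
        PySem.Dict.items_insert_of_not_contains _ _ hcf
      have hstep : feStepE (seen, rep, idxs) (idx, entry) =
          (seen ++ [entry], rep.insert (pyStrRow entry) [idx], idxs) := by
        simp [feStepE, hmem]
      rw [hstep, hgroup]
      have hreconNew : pvRecon arr (pyStrRow entry, [idx]) = entry := by
        have h1 : PySem.List.pyGetD [idx] 0 0 = idx := by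
          simp [PySem.List.pyGetD, PySem.List.pyGet?, PySem.List.pyIdx?]
        simp only [pvRecon]
        rw [h1]
        exact hfe
      have hInv' : pvInv arr (seen ++ [entry], rep.insert (pyStrRow entry) [idx], idxs) := by
        refine ⟨?_, ?_, ?_, hPw, ?_⟩
        · simp only [hitems, List.map_append, List.map_cons, List.map_nil, hSeen, hreconNew]
        · intro r hr
          rw [hitems] at hr
          rcases List.mem_append.mp hr with hr' | hr'
          · exact hKey r hr'
          · rcases List.mem_singleton.mp hr' with rfl
            exact ⟨by simp, by rw [hreconNew]⟩
        · simp only [PySem.Dict.keys, hitems, List.map_append, List.map_cons, List.map_nil]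
          rw [List.nodup_append]
          refine ⟨hNodup, by simp, ?_⟩
          intro x hx y hy
          simp only [List.mem_singleton] at hy
          subst hy
          simp only [PySem.Dict.contains] at hcf
          rw [List.any_eq_false] at hcf
          obtain ⟨r, hr, hrk⟩ := List.mem_map.mp hx
          intro hxy
          exact hcf r hr (by simp [hrk, hxy])
        · simpa [hitems, List.flatMap_append] using hPerm
      obtain ⟨hA, hB⟩ := ih _ hInv' (fun r hr => hf r (by simp [hr]))
        (List.Pairwise.of_cons hp)
        (fun r hr x hx => hb r (by simp [hr]) x hx)
      exact ⟨hA, hB⟩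

-- ===== VERDICT (by name: the statement is the Claim_ definition above) =====
theorem find_repeated_entries_spec : Claim_equal_find_repeated_entries := by
  intro arr _
  unfold Spec_find_repeated_entries find_repeated_entries find_repeated_entries_alt
  -- rewrite A's fold over range(len) as a fold over enumerate
  have hbridge : (PySem.List.pyRange 0 (PySem.List.len arr)).foldl (feStep arr)
      ([], PySem.Dict.empty, []) =
      (PySem.List.enumerate arr).foldl feStepE ([], PySem.Dict.empty, []) := by
    rw [PySem.List.enumerate_eq_map_pyRange arr [], List.foldl_map]
    rfl
  have hInv0 : pvInv arr (([], PySem.Dict.empty, []) :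
      List (List Int) × PySem.Dict String (List Int) × List Int) := by
    refine ⟨rfl, ?_, ?_, List.Pairwise.nil, ?_⟩ <;>
      simp [PySem.Dict.empty, PySem.Dict.keys]
  have hf : ∀ p ∈ PySem.List.enumerate arr, PySem.List.pyGetD arr p.1 [] = p.2 := by
    rw [PySem.List.enumerate_eq_map_pyRange arr []]
    intro p hp
    obtain ⟨j, _, rfl⟩ := List.mem_map.mp hp
    rfl
  obtain ⟨hA, hSeen, hKey, _, hPw, hPerm⟩ :=
    pv_main arr (PySem.List.enumerate arr) ([], PySem.Dict.empty, []) hInv0 hf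
      (PySem.List.pairwise_lt_enumerate arr 0) (by simp)
  rw [hbridge]
  set st := (PySem.List.enumerate arr).foldl feStepE ([], PySem.Dict.empty, []) with hst
  simp only at hA
  refine Prod.ext ?_ (Prod.ext ?_ ?_)
  · -- seen
    simp only [hSeen, ← hA, PySem.Dict.values, List.map_map]
    rfl
  · -- the dict
    simp only [← hA]
  · -- idx_list
    simp only [← hA, PySem.Dict.values]
    rw [PySem.List.sorted_eq_of_perm_of_pairwise_lt _ st.2.2 (fun i => i) ?_ hPw]
    rw [List.flatMap_map]
    exact hPerm
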